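-- pv_equiv track=rewrite | github.com/pzelenin92/learning_programming | Stepik/Algorithms_theory_and_practice_course_217/2/2.2/2.2.8/pre_algs/fib_matr.py | fast_pow_matr
-- ===== SOURCE A (Python) =====
-- def fast_pow_matr(n,pa=1,pb=0,pc=0,pd=1):
--
--     a, b, c, d = 1, 1, 1, 0
--
--     while n!=0:
--
--         if n%2 == 1:
--
--             pat = a * pa + b * pc
--             pbt = a * pb + b * pd
--             pct = c * pa + d * pc
--             pdt = c * pb + d * pd
--             pa,pb,pc,pd = pat, pbt, pct, pdt
--             n-=1
--
--         at = a * a + b * c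
--         bt = a * b + b * d
--         ct = c * a + d * c
--         dt = c * b + d * d
--         a,b,c,d = at, bt, ct, dt
--         n=n//2
--
--     pc_pd=[pc,pd]
--     return pc_pd
-- ===== SOURCE B (Python) =====
-- def fast_pow_matr(n, pa=1, pb=0, pc=0, pd=1):
--     # Fast-doubling Fibonacci: fd(k) = (F(k), F(k+1)); result is the
--     # bottom row of M^n * P, i.e. [F(n)*pa + F(n-1)*pc, F(n)*pb + F(n-1)*pd].
--     def fd(k):
--         if k == 0:
--             return (0, 1)
--         f, f1 = fd(k >> 1)
--         e = f * (2 * f1 - f)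
--         o = f * f + f1 * f1
--         if k & 1:
--             return (o, e + o)
--         return (e, o)
--     f, f1 = fd(n)
--     fm1 = f1 - f
--     return [f * pa + fm1 * pc, f * pb + fm1 * pd]
-- ===== Notes on version B (the rewrite author's own statement) =====
-- stated objective: alternative
-- what changed: Replaces the 2x2 matrix binary-exponentiation loop by a fast-doubling recursion on the bits of n that carries only the Fibonacci pair (F(k), F(k+1)) and combines the result with (pa,pb,pc,pd) in one closed-form step at the end.
import Mathlib
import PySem

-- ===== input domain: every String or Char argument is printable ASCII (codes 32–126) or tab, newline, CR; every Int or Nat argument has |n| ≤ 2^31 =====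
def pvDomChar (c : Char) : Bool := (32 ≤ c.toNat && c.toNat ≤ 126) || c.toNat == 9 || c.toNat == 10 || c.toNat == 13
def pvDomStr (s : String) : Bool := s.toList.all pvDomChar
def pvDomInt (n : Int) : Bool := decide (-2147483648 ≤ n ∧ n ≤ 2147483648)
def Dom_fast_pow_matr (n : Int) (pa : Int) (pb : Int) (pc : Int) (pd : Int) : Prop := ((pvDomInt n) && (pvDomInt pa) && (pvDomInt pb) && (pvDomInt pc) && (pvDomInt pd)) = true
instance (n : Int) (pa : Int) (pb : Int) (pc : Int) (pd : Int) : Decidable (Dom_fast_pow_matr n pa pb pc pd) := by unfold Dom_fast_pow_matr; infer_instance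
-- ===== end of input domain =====

-- B replaces A's 2x2-matrix binary exponentiation by a fast-doubling Fibonacci-pair
-- recursion (alternative algorithm, same asymptotics); the ports agree on all inputs
-- (on negative n neither Python returns: A loops forever, B exhausts the recursion limit).

-- ===== PORT A =====
-- A's while-loop, one recursive step per iteration; when n is odd Python's
-- 'n-=1; n//=2' is (n-1)/2, when even it is n/2 (Nat division = Python floordiv here).
def fpmLoop (n : Nat) (a b c d pa pb pc pd : Int) : List Int :=
  if n = 0 then [pc, pd]
  else if n % 2 = 1 then
    fpmLoop ((n - 1) / 2)
      (a*a + b*c) (a*b + b*d) (c*a + d*c) (c*b + d*d)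
      (a*pa + b*pc) (a*pb + b*pd) (c*pa + d*pc) (c*pb + d*pd)
  else
    fpmLoop (n / 2)
      (a*a + b*c) (a*b + b*d) (c*a + d*c) (c*b + d*d)
      pa pb pc pd
termination_by n
decreasing_by all_goals omega

def fast_pow_matr (n : Int) (pa : Int) (pb : Int) (pc : Int) (pd : Int) : List Int :=
  fpmLoop n.toNat 1 1 1 0 pa pb pc pd

-- ===== PORT B =====
-- fd k = (F(k), F(k+1)) by fast doubling on the bits of k.
def fd (k : Nat) : Int × Int :=
  if k = 0 then (0, 1)
  else
    let p := fd (k / 2)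
    let f := p.1
    let f1 := p.2
    let e := f * (2 * f1 - f)
    let o := f * f + f1 * f1
    if k % 2 = 1 then (o, e + o) else (e, o)
termination_by k
decreasing_by omega

def fast_pow_matr_alt (n : Int) (pa : Int) (pb : Int) (pc : Int) (pd : Int) : List Int :=
  let p := fd n.toNat
  let f := p.1
  let fm1 := p.2 - p.1
  [f * pa + fm1 * pc, f * pb + fm1 * pd]

-- ===== PRECONDITION & SPEC =====
def Spec_fast_pow_matr (n : Int) (pa : Int) (pb : Int) (pc : Int) (pd : Int) (out : List Int) : Prop := out = fast_pow_matr_alt n pa pb pc pd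
instance (n : Int) (pa : Int) (pb : Int) (pc : Int) (pd : Int) (out : List Int) : Decidable (Spec_fast_pow_matr n pa pb pc pd out) := by unfold Spec_fast_pow_matr; infer_instance

-- ===== CLAIM (what is proved, stated in full; the proofs are below) =====
def Claim_equal_fast_pow_matr : Prop := ∀ (n : Int) (pa : Int) (pb : Int) (pc : Int) (pd : Int), Dom_fast_pow_matr n pa pb pc pd → Spec_fast_pow_matr n pa pb pc pd (fast_pow_matr n pa pb pc pd)

-- ===== LEMMAS AND PROOFS =====

-- 2x2 integer matrices as (a, b, c, d) = [[a, b], [c, d]].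
def mmul (x y : Int × Int × Int × Int) : Int × Int × Int × Int :=
  (x.1 * y.1 + x.2.1 * y.2.2.1,
   x.1 * y.2.1 + x.2.1 * y.2.2.2,
   x.2.2.1 * y.1 + x.2.2.2 * y.2.2.1,
   x.2.2.1 * y.2.1 + x.2.2.2 * y.2.2.2)

def mpow (x : Int × Int × Int × Int) : Nat → Int × Int × Int × Int
  | 0 => (1, 0, 0, 1)
  | k + 1 => mmul (mpow x k) x

def fibM : Int × Int × Int × Int := (1, 1, 1, 0)

lemma mmul_assoc (x y z : Int × Int × Int × Int) :
    mmul (mmul x y) z = mmul x (mmul y z) := by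
  simp only [mmul, Prod.mk.injEq]
  refine ⟨by ring, by ring, by ring, by ring⟩

lemma mmul_one (x : Int × Int × Int × Int) : mmul x (1, 0, 0, 1) = x := by
  simp [mmul]

lemma one_mmul (x : Int × Int × Int × Int) : mmul (1, 0, 0, 1) x = x := by
  simp [mmul]

lemma mpow_add (x : Int × Int × Int × Int) (m n : Nat) :
    mpow x (m + n) = mmul (mpow x m) (mpow x n) := by
  induction n with
  | zero => simp [mpow, mmul_one]
  | succ n ih =>
      show mpow x (m + n + 1) = _
      rw [mpow, ih, mpow, mmul_assoc]

lemma mpow_sq (x : Int × Int × Int × Int) (m : Nat) :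
    mpow (mmul x x) m = mpow x (2 * m) := by
  induction m with
  | zero => rfl
  | succ m ih =>
      rw [mpow, ih]
      have h2 : 2 * (m + 1) = 2 * m + 1 + 1 := by omega
      rw [h2, mpow, mpow, mmul_assoc]

-- A's loop computes the bottom row of X^n * P.
lemma fpmLoop_eq (n : Nat) : ∀ (a b c d pa pb pc pd : Int),
    fpmLoop n a b c d pa pb pc pd =
      [(mmul (mpow (a, b, c, d) n) (pa, pb, pc, pd)).2.2.1,
       (mmul (mpow (a, b, c, d) n) (pa, pb, pc, pd)).2.2.2] := by
  induction n using Nat.strong_induction_on with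
  | _ n ih =>
    intro a b c d pa pb pc pd
    rw [fpmLoop]
    by_cases h0 : n = 0
    · subst h0; simp [mpow, one_mmul]
    · simp only [h0, if_false]
      by_cases hodd : n % 2 = 1
      · simp only [hodd, if_true]
        rw [ih ((n - 1) / 2) (by omega)]
        have key : mpow ((a*a + b*c, a*b + b*d, c*a + d*c, c*b + d*d)) ((n - 1) / 2) =
            mpow (a, b, c, d) (2 * ((n - 1) / 2)) := by
          have : (a*a + b*c, a*b + b*d, c*a + d*c, c*b + d*d) =
              mmul (a, b, c, d) (a, b, c, d) := by simp [mmul]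
          rw [this, mpow_sq]
        rw [key]
        have hmm : (a*pa + b*pc, a*pb + b*pd, c*pa + d*pc, c*pb + d*pd) =
            mmul (a, b, c, d) (pa, pb, pc, pd) := by simp [mmul]
        rw [hmm, ← mmul_assoc]
        have hstep : mmul (mpow (a, b, c, d) (2 * ((n - 1) / 2))) (a, b, c, d) =
            mpow (a, b, c, d) (2 * ((n - 1) / 2) + 1) := rfl
        have hn : 2 * ((n - 1) / 2) + 1 = n := by omega
        rw [hstep, hn]
      · simp only [hodd, if_false]
        rw [ih (n / 2) (by omega)]
        have key : mpow ((a*a + b*c, a*b + b*d, c*a + d*c, c*b + d*d)) (n / 2) =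
            mpow (a, b, c, d) (2 * (n / 2)) := by
          have : (a*a + b*c, a*b + b*d, c*a + d*c, c*b + d*d) =
              mmul (a, b, c, d) (a, b, c, d) := by simp [mmul]
          rw [this, mpow_sq]
        have hn : 2 * (n / 2) = n := by omega
        rw [key, hn]

-- Powers of the Fibonacci matrix are symmetric with a = b + d.
lemma fibM_sym (k : Nat) :
    (mpow fibM k).2.1 = (mpow fibM k).2.2.1 ∧
    (mpow fibM k).1 = (mpow fibM k).2.1 + (mpow fibM k).2.2.2 := by
  induction k with
  | zero => simp [mpow]
  | succ k ih =>
      obtain ⟨h1, h2⟩ := ih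
      rcases hX : mpow fibM k with ⟨a, b, c, d⟩
      rw [hX] at h1 h2
      rw [mpow, hX]
      simp only [mmul, fibM] at h1 h2 ⊢
      constructor <;> omega

-- fd k is the (c, a) pair of fibM^k.
lemma fd_eq (k : Nat) :
    fd k = ((mpow fibM k).2.2.1, (mpow fibM k).1) := by
  induction k using Nat.strong_induction_on with
  | _ k ih =>
    rw [fd]
    by_cases h0 : k = 0
    · subst h0; simp [mpow]
    · simp only [h0, if_false]
      rw [ih (k / 2) (by omega)]
      obtain ⟨hs1, hs2⟩ := fibM_sym (k / 2)
      rcases hX : mpow fibM (k / 2) with ⟨a, b, c, d⟩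
      rw [hX] at hs1 hs2
      simp only at hs1 hs2
      have hdbl : mpow fibM (k / 2 + k / 2) = mmul (a, b, c, d) (a, b, c, d) := by
        rw [mpow_add, hX]
      by_cases hodd : k % 2 = 1
      · have hk : k = k / 2 + k / 2 + 1 := by omega
        have hmk : mpow fibM k = mmul (mmul (a, b, c, d) (a, b, c, d)) fibM := by
          conv_lhs => rw [hk]
          rw [mpow, hdbl]
        rw [hmk]
        simp only [hodd, if_true, mmul, fibM, Prod.mk.injEq]
        subst hs1 hs2
        constructor <;> ring
      · have hk : k = k / 2 + k / 2 := by omega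
        have hmk : mpow fibM k = mmul (a, b, c, d) (a, b, c, d) := by
          conv_lhs => rw [hk]
          exact hdbl
        rw [hmk]
        simp only [hodd, if_false, mmul, Prod.mk.injEq]
        subst hs1 hs2
        constructor <;> ring

-- ===== VERDICT (by name: the statement is the Claim_ definition above) =====
theorem fast_pow_matr_spec : Claim_equal_fast_pow_matr := by
  intro n pa pb pc pd _
  show fast_pow_matr n pa pb pc pd = fast_pow_matr_alt n pa pb pc pd
  rw [fast_pow_matr, fast_pow_matr_alt, fpmLoop_eq, fd_eq,
    show ((1:Int), (1:Int), (1:Int), (0:Int)) = fibM from rfl]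
  obtain ⟨h1, h2⟩ := fibM_sym n.toNat
  rcases hX : mpow fibM n.toNat with ⟨a, b, c, d⟩
  rw [hX] at h1 h2
  simp only at h1 h2
  simp only [mmul]
  subst h1 h2
  simp only [List.cons.injEq, and_true]
  constructor <;> ring
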